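-- pv_equiv track=rewrite | github.com/nrc-cnrc/Portage-SMT-TAS | src/truecasing/casemark.py | is_title
-- ===== SOURCE A (Python) =====
-- def is_title(s):
--     """Return True if a single token string s is title cased.
--
--     is_title(s) treats strings containing hyphens and/or slashes differently
--     than s.istitle() does:
--     is_title("Hyphened-word") returns True; "Hyphened-word".istitle() returns False
--     is_title("Hyphened-Word") returns False; "Hyphened-Word".istitle() returns True
--
--     s: single token string to be checked for title case
--     returns: True is s is title cased or False if s is not title cased.
--     """
--     for idx, c in enumerate(s):
--         if c.islower():
--             return False
--         if c.isupper():
--             for c2 in s[idx+1:]: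
--                 if c2.isupper():
--                     return False
--             return True
--     return False
-- ===== SOURCE B (Python) =====
-- def is_title(s):
--     """Title-cased check: first cased char is uppercase and s has exactly one uppercase char."""
--     first = next((c for c in s if c.isupper() or c.islower()), None)
--     if first is None or first.islower():
--         return False
--     return sum(1 for c in s if c.isupper()) == 1
-- ===== Notes on version B (the rewrite author's own statement) =====
-- stated objective: simpler
-- what changed: Replaces A's fused early-exit scan with an inner rest-loop by two aggregate passes: find the first cased character, then require it uppercase and the total uppercase count to be exactly one.
import Mathlib
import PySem

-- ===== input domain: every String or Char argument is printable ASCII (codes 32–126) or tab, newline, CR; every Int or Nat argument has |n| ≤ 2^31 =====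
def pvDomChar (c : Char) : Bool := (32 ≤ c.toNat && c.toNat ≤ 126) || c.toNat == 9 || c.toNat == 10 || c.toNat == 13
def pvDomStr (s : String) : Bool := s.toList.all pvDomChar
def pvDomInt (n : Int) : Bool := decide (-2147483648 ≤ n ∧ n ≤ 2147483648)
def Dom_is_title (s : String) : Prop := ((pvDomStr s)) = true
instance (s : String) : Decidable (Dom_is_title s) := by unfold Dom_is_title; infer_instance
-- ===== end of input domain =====

-- B replaces A's fused early-exit scan (with inner rest-loop) by two aggregate passes
-- (first cased char lookup + uppercase count); objective: simpler.


-- ===== PORT A =====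
-- inner loop: 'for c2 in s[idx+1:]: if c2.isupper(): return False' then 'return True'
def isTitleRest : List Char → Bool
  | [] => true
  | c2 :: t => if PySem.Chars.isupper c2 then false else isTitleRest t

-- outer loop over enumerate(s); the suffix s[idx+1:] is exactly the tail at idx
def isTitleLoop : List Char → Bool
  | [] => false
  | c :: t =>
    if PySem.Chars.islower c then false
    else if PySem.Chars.isupper c then isTitleRest t
    else isTitleLoop t

def is_title (s : String) : Bool := isTitleLoop s.toList

-- ===== PORT B =====
-- next((c for c in s if c.isupper() or c.islower()), None); then uppercase count == 1
def is_title_alt (s : String) : Bool :=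
  match s.toList.find? (fun c => PySem.Chars.isupper c || PySem.Chars.islower c) with
  | none => false
  | some c =>
    if PySem.Chars.islower c then false
    else s.toList.countP (fun c => PySem.Chars.isupper c) == 1

-- ===== PRECONDITION & SPEC =====
def Spec_is_title (s : String) (out : Bool) : Prop := out = is_title_alt s
instance (s : String) (out : Bool) : Decidable (Spec_is_title s out) := by unfold Spec_is_title; infer_instance

-- ===== CLAIM (what is proved, stated in full; the proofs are below) =====
def Claim_equal_is_title : Prop := ∀ (s : String), Dom_is_title s → Spec_is_title s (is_title s)

-- ===== LEMMAS AND PROOFS =====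

theorem isTitleRest_eq_countP (l : List Char) :
    isTitleRest l = (l.countP (fun c => PySem.Chars.isupper c) == 0) := by
  induction l with
  | nil => rfl
  | cons c t ih =>
    simp only [isTitleRest, List.countP_cons]
    by_cases h : PySem.Chars.isupper c = true <;> simp [h, ih]

theorem isTitleLoop_eq_alt (l : List Char) :
    isTitleLoop l =
      (match l.find? (fun c => PySem.Chars.isupper c || PySem.Chars.islower c) with
       | none => false
       | some c =>
         if PySem.Chars.islower c then false
         else l.countP (fun c => PySem.Chars.isupper c) == 1) := by
  induction l with
  | nil => rfl
  | cons c t ih =>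
    by_cases hl : PySem.Chars.islower c = true
    · simp [isTitleLoop, hl]
    · by_cases hu : PySem.Chars.isupper c = true
      · simp [isTitleLoop, hl, hu, isTitleRest_eq_countP]
      · simpa [isTitleLoop, hl, hu] using ih

-- ===== VERDICT (by name: the statement is the Claim_ definition above) =====
theorem is_title_spec : Claim_equal_is_title := by
  intro s _
  unfold Spec_is_title is_title is_title_alt
  exact isTitleLoop_eq_alt s.toList
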